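-- pv_equiv track=rewrite | github.com/laizhenhai88/pil | sliderBreak.py | find_near_all
-- ===== SOURCE A (Python) =====
-- def find_near_all(find_p, distance):
--     p = []
--     nearest = 10
--     for i in range(0, len(find_p) -1):
--         for j in range(i+1, len(find_p)):
--             near = abs(abs(find_p[j] - find_p[i]) - distance)
--             if near < nearest:
--                 p.append([find_p[i], find_p[j]])
--     return p
-- ===== SOURCE B (Python) =====
-- def find_near_all(find_p, distance):
--     # value-indexed lookup: only values within [lo, hi] of gap can pair, window is at most 19 wide
--     lo = max(0, distance - 9)
--     hi = distance + 9
--     by_value = {}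
--     for j, v in enumerate(find_p):
--         by_value.setdefault(v, []).append(j)
--     res = []
--     for i, vi in enumerate(find_p):
--         cands = set()
--         for t in range(lo, hi + 1):
--             cands.add(vi - t)
--             cands.add(vi + t)
--         js = []
--         for v in sorted(cands):
--             for j in by_value.get(v, []):
--                 if j > i:
--                     js.append(j)
--         js.sort()
--         for j in js:
--             res.append([vi, find_p[j]])
--     return res
-- ===== Notes on version B (the rewrite author's own statement) =====
-- stated objective: faster
-- what changed: Replaces the all-pairs double loop with a value-indexed hash map (value -> ascending index list) queried through the fixed-width gap window [max(0,distance-9), distance+9], collecting matching later indices per anchor and sorting them, so the quadratic inner scan disappears.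
import Mathlib
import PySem

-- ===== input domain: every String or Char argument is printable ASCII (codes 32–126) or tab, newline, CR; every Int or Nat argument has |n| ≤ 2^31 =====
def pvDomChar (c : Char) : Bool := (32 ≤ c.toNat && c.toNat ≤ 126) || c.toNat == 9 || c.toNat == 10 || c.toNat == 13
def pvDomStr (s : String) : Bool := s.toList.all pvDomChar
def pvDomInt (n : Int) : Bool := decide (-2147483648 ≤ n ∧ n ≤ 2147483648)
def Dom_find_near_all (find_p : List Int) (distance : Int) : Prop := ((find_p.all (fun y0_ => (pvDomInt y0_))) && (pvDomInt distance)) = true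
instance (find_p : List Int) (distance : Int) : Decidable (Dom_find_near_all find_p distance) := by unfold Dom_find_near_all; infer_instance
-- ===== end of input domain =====

-- B replaces A's all-pairs double loop by a value->indices map queried through the
-- fixed-width gap window [max(0,distance-9), distance+9] (measured faster in a timing run).

-- ===== PORT A =====
def find_near_all (find_p : List Int) (distance : Int) : List (List Int) :=
  let nearest : Int := 10
  (PySem.List.pyRange 0 ((find_p.length : Int) - 1) 1).foldl (fun p i =>
    (PySem.List.pyRange (i + 1) (find_p.length : Int) 1).foldl (fun p j =>
      let near := |(|PySem.List.pyGetD find_p j 0 - PySem.List.pyGetD find_p i 0|) - distance|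
      if near < nearest then p ++ [[PySem.List.pyGetD find_p i 0, PySem.List.pyGetD find_p j 0]]
      else p) p) []

-- ===== PORT B =====
def find_near_all_alt (find_p : List Int) (distance : Int) : List (List Int) :=
  let lo := max 0 (distance - 9)
  let hi := distance + 9
  let by_value : PySem.Dict Int (List Int) :=
    (PySem.List.enumerate find_p 0).foldl
      (fun d p => d.modify p.2 [] (fun l => l ++ [p.1])) PySem.Dict.empty
  (PySem.List.enumerate find_p 0).foldl (fun res p =>
    let i := p.1
    let vi := p.2
    let cands : PySem.Set Int :=
      (PySem.List.pyRange lo (hi + 1) 1).foldl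
        (fun s t => PySem.Set.add (PySem.Set.add s (vi - t)) (vi + t)) PySem.Set.empty
    let js : List Int :=
      (PySem.List.sorted cands (fun v => v) false).foldl (fun js v =>
        (by_value.getD v []).foldl (fun js j => if i < j then js ++ [j] else js) js) []
    (PySem.List.sorted js (fun j => j) false).foldl
      (fun res j => res ++ [[vi, PySem.List.pyGetD find_p j 0]]) res) []

-- ===== PRECONDITION & SPEC =====
def Spec_find_near_all (find_p : List Int) (distance : Int) (out : List (List Int)) : Prop := out = find_near_all_alt find_p distance
instance (find_p : List Int) (distance : Int) (out : List (List Int)) : Decidable (Spec_find_near_all find_p distance out) := by unfold Spec_find_near_all; infer_instance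

-- ===== CLAIM (what is proved, stated in full; the proofs are below) =====
def Claim_equal_find_near_all : Prop := ∀ (find_p : List Int) (distance : Int), Dom_find_near_all find_p distance → Spec_find_near_all find_p distance (find_near_all find_p distance)

-- ===== LEMMAS AND PROOFS =====

-- the pair condition of A, and the canonical per-anchor row list both programs produce
@[reducible] def pvCond (find_p : List Int) (distance i j : Int) : Prop :=
  |(|PySem.List.pyGetD find_p j 0 - PySem.List.pyGetD find_p i 0|) - distance| < 10

def pvCanon (find_p : List Int) (distance i : Int) : List (List Int) :=
  ((PySem.List.pyRange (i + 1) (find_p.length : Int) 1).filter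
      (fun j => decide (pvCond find_p distance i j))).map
    (fun j => [PySem.List.pyGetD find_p i 0, PySem.List.pyGetD find_p j 0])

theorem A_eq_flatMap (find_p : List Int) (distance : Int) :
    find_near_all find_p distance =
      (PySem.List.pyRange 0 (find_p.length : Int) 1).flatMap (pvCanon find_p distance) := by
  have hinner : ∀ (i : Int) (acc : List (List Int)),
      List.foldl
        (fun p j =>
          if |(|PySem.List.pyGetD find_p j 0 - PySem.List.pyGetD find_p i 0|) - distance| < (10 : Int) then
            p ++ [[PySem.List.pyGetD find_p i 0, PySem.List.pyGetD find_p j 0]]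
          else p)
        acc (PySem.List.pyRange (i + 1) (find_p.length : Int) 1) =
      acc ++ pvCanon find_p distance i := by
    intro i acc
    rw [PySem.List.foldl_append_ite
          (fun j => |(|PySem.List.pyGetD find_p j 0 - PySem.List.pyGetD find_p i 0|) - distance| < (10 : Int))
          (fun j => [PySem.List.pyGetD find_p i 0, PySem.List.pyGetD find_p j 0])]
    rfl
  simp only [find_near_all]
  rw [PySem.List.foldl_congr_mem' _ _ (fun p i => p ++ pvCanon find_p distance i) _
        (fun i _ acc => hinner i acc),
      PySem.List.foldl_append_eq_flatMap, List.nil_append]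
  rcases eq_or_ne find_p [] with rfl | hne
  · rfl
  · have hlen : (1 : Int) ≤ (find_p.length : Int) := by
      have : find_p.length ≠ 0 := by simpa using hne
      omega
    rw [show (find_p.length : Int) = ((find_p.length : Int) - 1) + 1 by ring,
        PySem.List.pyRange_one_succ_right
          (show (0:Int) ≤ (find_p.length : Int) - 1 by omega), List.flatMap_append]
    simp [pvCanon]

-- the per-value ascending index list B's table stores
def pvBucket (find_p : List Int) (v : Int) : List Int :=
  (PySem.List.pyRange 0 (find_p.length : Int) 1).filter
    (fun j => PySem.List.pyGetD find_p j 0 == v)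

theorem bucket_eq (find_p : List Int) (v : Int) :
    (List.foldl (fun d p => d.modify p.2 [] (fun l => l ++ [p.1])) PySem.Dict.empty
        ((PySem.List.pyRange 0 (find_p.length : Int) 1).map
          (fun j => (j, PySem.List.pyGetD find_p j 0)))).getD v [] =
      pvBucket find_p v := by
  have h := PySem.Dict.getD_foldl_modify_append
      (l := ((PySem.List.pyRange 0 (find_p.length : Int) 1).map
          (fun j => (j, PySem.List.pyGetD find_p j 0))).map (fun p => (p.2, p.1)))
      (d := (PySem.Dict.empty : PySem.Dict Int (List Int))) (c := v)
  rw [List.foldl_map] at h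
  rw [h]
  simp [pvBucket, List.map_map, List.filter_map, Function.comp_def]

-- membership in the candidate-value set B accumulates
theorem mem_cands (l : List Int) (s : PySem.Set Int) (a y : Int) :
    y ∈ l.foldl (fun s t => PySem.Set.add (PySem.Set.add s (a - t)) (a + t)) s ↔
      y ∈ s ∨ ∃ t ∈ l, y = a - t ∨ y = a + t := by
  induction l generalizing s with
  | nil => simp
  | cons t l ih =>
    rw [List.foldl_cons, ih]
    simp only [PySem.Set.mem_add, List.mem_cons]
    constructor
    · rintro (((h | h) | h) | ⟨u, hu, h⟩)
      · exact Or.inl h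
      · exact Or.inr ⟨t, Or.inl rfl, Or.inl h⟩
      · exact Or.inr ⟨t, Or.inl rfl, Or.inr h⟩
      · exact Or.inr ⟨u, Or.inr hu, h⟩
    · rintro (h | ⟨u, (rfl | hu), h⟩)
      · exact Or.inl (Or.inl (Or.inl h))
      · rcases h with h | h
        · exact Or.inl (Or.inl (Or.inr h))
        · exact Or.inl (Or.inr h)
      · exact Or.inr ⟨u, hu, h⟩

theorem nodup_cands (l : List Int) (s : PySem.Set Int) (a : Int) (hs : s.Nodup) :
    (l.foldl (fun s t => PySem.Set.add (PySem.Set.add s (a - t)) (a + t)) s).Nodup := by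
  induction l generalizing s with
  | nil => exact hs
  | cons t l ih => exact ih _ (PySem.Set.nodup_add _ _ (PySem.Set.nodup_add _ _ hs))

-- the window scan hits exactly the values at an admissible gap
theorem window_iff (a b d : Int) :
    (∃ t, (max 0 (d - 9) ≤ t ∧ t < d + 9 + 1) ∧ (b = a - t ∨ b = a + t)) ↔
      |(|b - a|) - d| < 10 := by
  constructor
  · rintro ⟨t, ⟨h1, h2⟩, rfl | rfl⟩
    · rw [show a - t - a = -t by ring, abs_neg, abs_of_nonneg (by omega : (0:Int) ≤ t)]
      rcases abs_cases (t - d) with ⟨e, s⟩ | ⟨e, s⟩ <;> rw [e] <;> omega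
    · rw [show a + t - a = t by ring, abs_of_nonneg (by omega : (0:Int) ≤ t)]
      rcases abs_cases (t - d) with ⟨e, s⟩ | ⟨e, s⟩ <;> rw [e] <;> omega
  · intro h
    rcases abs_cases (|b - a| - d) with ⟨e2, s2⟩ | ⟨e2, s2⟩ <;> rw [e2] at h <;>
      rcases abs_cases (b - a) with ⟨e1, s1⟩ | ⟨e1, s1⟩ <;> rw [e1] at h s2
    · exact ⟨b - a, ⟨by omega, by omega⟩, Or.inr (by omega)⟩
    · exact ⟨a - b, ⟨by omega, by omega⟩, Or.inl (by omega)⟩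
    · exact ⟨b - a, ⟨by omega, by omega⟩, Or.inr (by omega)⟩
    · exact ⟨a - b, ⟨by omega, by omega⟩, Or.inl (by omega)⟩

-- B's candidate set for anchor value vi
def pvCands (distance vi : Int) : PySem.Set Int :=
  (PySem.List.pyRange (max 0 (distance - 9)) (distance + 9 + 1) 1).foldl
    (fun s t => PySem.Set.add (PySem.Set.add s (vi - t)) (vi + t)) PySem.Set.empty

theorem mem_pvCands (distance vi y : Int) :
    y ∈ pvCands distance vi ↔ |(|y - vi|) - distance| < 10 := by
  unfold pvCands
  rw [mem_cands, ← window_iff vi y distance]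
  simp [PySem.Set.empty, PySem.List.mem_pyRange_one]

theorem nodup_pvCands (distance vi : Int) : (pvCands distance vi).Nodup :=
  nodup_cands _ _ _ List.nodup_nil

-- the per-anchor index list B gathers and sorts is exactly A's inner filter
theorem js_eq (find_p : List Int) (distance i : Int) (hi0 : 0 ≤ i) :
    PySem.List.sorted
      ((PySem.List.sorted (pvCands distance (PySem.List.pyGetD find_p i 0)) (fun v => v) false).flatMap
        (fun v => (pvBucket find_p v).filter (fun j => decide (i < j))))
      (fun j => j) false =
      (PySem.List.pyRange (i + 1) (find_p.length : Int) 1).filter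
        (fun j => decide (pvCond find_p distance i j)) := by
  have hys : ((PySem.List.pyRange (i + 1) (find_p.length : Int) 1).filter
      (fun j => decide (pvCond find_p distance i j))).Nodup :=
    (PySem.List.nodup_pyRange_one _ _).filter _
  have hsortnd : (PySem.List.sorted (pvCands distance (PySem.List.pyGetD find_p i 0))
      (fun v => v) false).Nodup :=
    ((PySem.List.sorted_perm _ _ _).nodup_iff).mpr (nodup_pvCands _ _)
  have hxs : ((PySem.List.sorted (pvCands distance (PySem.List.pyGetD find_p i 0)) (fun v => v) false).flatMap
      (fun v => (pvBucket find_p v).filter (fun j => decide (i < j)))).Nodup := by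
    rw [List.nodup_flatMap]
    constructor
    · intro v _
      exact ((PySem.List.nodup_pyRange_one _ _).filter _).filter _
    · refine hsortnd.imp ?_
      intro v w hvw a ha hb
      simp only [List.mem_filter, pvBucket, beq_iff_eq] at ha hb
      exact hvw (ha.1.2.symm.trans hb.1.2)
  apply PySem.List.sorted_eq_of_perm_of_pairwise_lt
  · refine (List.perm_ext_iff_of_nodup hys hxs).mpr ?_
    intro j
    simp only [List.mem_filter, PySem.List.mem_pyRange_one, List.mem_flatMap,
      PySem.List.mem_sorted, pvBucket, decide_eq_true_eq, beq_iff_eq]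
    constructor
    · rintro ⟨⟨h1, h2⟩, hc⟩
      unfold pvCond at hc
      exact ⟨PySem.List.pyGetD find_p j 0, (mem_pvCands _ _ _).mpr hc,
        ⟨⟨by omega, h2⟩, rfl⟩, by omega⟩
    · rintro ⟨v, hv, ⟨⟨h0, h2⟩, hfv⟩, hij⟩
      subst hfv
      refine ⟨⟨by omega, h2⟩, ?_⟩
      exact (mem_pvCands _ _ _).mp hv
  · exact List.Pairwise.filter _ (PySem.List.pairwise_lt_pyRange_one _ _)

theorem B_eq_flatMap (find_p : List Int) (distance : Int) :
    find_near_all_alt find_p distance =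
      (PySem.List.pyRange 0 (find_p.length : Int) 1).flatMap (pvCanon find_p distance) := by
  simp only [find_near_all_alt]
  rw [PySem.List.enumerate_eq_map_pyRange find_p 0]
  simp only [PySem.List.len_eq]
  rw [List.foldl_map]
  rw [PySem.List.foldl_congr_mem' _ _ (fun res i => res ++ pvCanon find_p distance i) _ ?_,
      PySem.List.foldl_append_eq_flatMap, List.nil_append]
  intro i hi res
  have hi0 : 0 ≤ i := ((PySem.List.mem_pyRange_one).mp hi).1
  simp only [PySem.List.foldl_append_singleton_eq_map]
  simp only [bucket_eq, PySem.List.foldl_append_ite_eq_filter,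
    PySem.List.foldl_append_eq_flatMap, List.nil_append]
  rw [← pvCands.eq_def, js_eq find_p distance i hi0]
  simp [pvCanon]

-- ===== VERDICT (by name: the statement is the Claim_ definition above) =====
theorem find_near_all_spec : Claim_equal_find_near_all := by
  intro find_p distance _
  show find_near_all find_p distance = find_near_all_alt find_p distance
  rw [A_eq_flatMap, B_eq_flatMap]
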